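-- pv_equiv track=rewrite | github.com/reeshee/MIE444-robot | final_dawgy.py | segment_path
-- ===== SOURCE A (Python) =====
-- def segment_path(path_points, max_segment_length=5):
--     """
--     Converts a list of waypoints into segments of straight lines.
--     Each segment contains waypoints that are in the same direction
--     and has a maximum length of max_segment_length points.
--     """
--     if not path_points:
--         return []
--
--     segments = []
--     start_point = path_points[0]
--     prev_point = path_points[0]
--     current_direction = None
--     segment_length = 1  # Initialize segment length
--
--     for point in path_points[1:]:
--         # Calculate direction from prev_point to current point
--         dx = point[0] - prev_point[0]
--         dy = point[1] - prev_point[1]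
--         direction = (dx, dy)
--
--         # Check if direction has changed
--         if current_direction is None:
--             current_direction = direction
--             segment_length = 1
--         elif direction != current_direction or segment_length >= max_segment_length:
--             # Direction changed or max segment length reached, finalize current segment
--             segments.append({
--                 'start': start_point,
--                 'end': prev_point,
--                 'direction': current_direction
--             })
--             # Start a new segment
--             start_point = prev_point
--             current_direction = direction
--             segment_length = 1
--         else:
--             segment_length += 1
--
--         prev_point = point
--
--     # Add the last segment
--     segments.append({
--         'start': start_point,
--         'end': prev_point,
--         'direction': current_direction
--     })
--
--     return segments
-- ===== SOURCE B (Python) =====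
-- def segment_path(path_points, max_segment_length=5):
--     """Runs-then-chunks re-implementation: precompute the delta list, group
--     maximal runs of equal direction, and cut each run into chunks of at most
--     max_segment_length deltas."""
--     if not path_points:
--         return []
--     if len(path_points) == 1:
--         p = path_points[0]
--         return [{'start': p, 'end': p, 'direction': None}]
--     dirs = [(b[0] - a[0], b[1] - a[1])
--             for a, b in zip(path_points, path_points[1:])]
--     step = max(1, max_segment_length)
--     segments = []
--     i = 0
--     while i < len(dirs):
--         j = i
--         while j < len(dirs) and dirs[j] == dirs[i]:
--             j += 1
--         # deltas i..j-1 all share direction dirs[i]; cut into chunks of `step`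
--         for k in range(i, j, step):
--             e = min(k + step, j)
--             segments.append({'start': path_points[k],
--                              'end': path_points[e],
--                              'direction': dirs[i]})
--         i = j
--     return segments
-- ===== Notes on version B (the rewrite author's own statement) =====
-- stated objective: alternative
-- what changed: Replaces A's single stateful loop (prev point, current direction, running length counter) by a two-phase decomposition: precompute the list of consecutive deltas, then group maximal runs of equal direction and cut each run into chunks of at most max_segment_length deltas via an index-stepping range.
import Mathlib
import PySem

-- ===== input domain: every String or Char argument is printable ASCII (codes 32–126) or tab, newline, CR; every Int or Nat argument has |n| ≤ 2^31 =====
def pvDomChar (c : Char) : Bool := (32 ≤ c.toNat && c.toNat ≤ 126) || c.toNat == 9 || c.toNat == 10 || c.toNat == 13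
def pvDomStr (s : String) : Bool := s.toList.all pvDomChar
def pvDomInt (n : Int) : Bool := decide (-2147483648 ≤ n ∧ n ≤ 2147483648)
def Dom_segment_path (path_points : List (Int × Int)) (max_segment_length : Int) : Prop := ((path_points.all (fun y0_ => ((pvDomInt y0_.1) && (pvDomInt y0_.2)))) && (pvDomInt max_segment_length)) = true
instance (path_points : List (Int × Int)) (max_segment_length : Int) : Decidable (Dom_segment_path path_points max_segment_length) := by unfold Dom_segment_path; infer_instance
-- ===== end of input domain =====

-- B replaces A's stateful single loop by deltas → maximal equal-direction runs → chunks of at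
-- most max_segment_length; equal return values proved on all inputs with length ≠ 1.

-- ===== PORT A =====
-- the dict {'start': s, 'end': e, 'direction': d} as an association list
def pvSegA (s e d : Int × Int) : List (String × Int × Int) :=
  [("start", s), ("end", e), ("direction", d)]

-- A's for-loop; state = (segments, start_point, prev_point, current_direction, segment_length).
-- current_direction is none only before the first delta; the final append with a none direction
-- (only reachable for a single-point input, excluded by Pre_) renders None as (0, 0).
def pvLoopA (m : Int) (segs : List (List (String × Int × Int)))
    (s prev : Int × Int) (cur : Option (Int × Int)) (len : Int) :
    List (Int × Int) → List (List (String × Int × Int))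
  | [] => segs ++ [pvSegA s prev (cur.getD (0, 0))]
  | p :: ps =>
    let d : Int × Int := (p.1 - prev.1, p.2 - prev.2)
    match cur with
    | none => pvLoopA m segs s p (some d) 1 ps
    | some cd =>
      if d ≠ cd ∨ len ≥ m then
        pvLoopA m (segs ++ [pvSegA s prev cd]) prev p (some d) 1 ps
      else
        pvLoopA m segs s p (some cd) (len + 1) ps

def segment_path (path_points : List (Int × Int)) (max_segment_length : Int) : List (List (String × Int × Int)) :=
  match path_points with
  | [] => []
  | p :: ps => pvLoopA max_segment_length [] p p none 1 ps

-- ===== PORT B =====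
-- the dict {'start': s, 'end': e, 'direction': d} as an association list (B's own copy)
def pvSegB (s e d : Int × Int) : List (String × Int × Int) :=
  [("start", s), ("end", e), ("direction", d)]

-- Source B's inner `while j < len(dirs) and dirs[j] == dirs[i]`: the maximal prefix of the (delta,
-- endpoint) pairs whose delta equals d, returned as (its endpoints, the remaining pairs)
def pvTakeRun (d : Int × Int) : List ((Int × Int) × (Int × Int)) → List (Int × Int) × List ((Int × Int) × (Int × Int))
  | [] => ([], [])
  | (d', p) :: rest =>
    if d' = d then
      let r := pvTakeRun d rest
      (p :: r.1, r.2)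
    else ([], (d', p) :: rest)

theorem pvTakeRun_len (d : Int × Int) (l : List ((Int × Int) × (Int × Int))) :
    (pvTakeRun d l).2.length ≤ l.length := by
  induction l with
  | nil => simp [pvTakeRun]
  | cons x rest ih =>
    obtain ⟨d', p⟩ := x
    simp only [pvTakeRun]
    split_ifs <;> simp <;> omega

-- Source B's `for k in range(i, j, step)` over one run: emit chunks of step = s1 + 1 endpoints
def pvEmitRun (s1 : Nat) (d : Int × Int) (s : Int × Int) : List (Int × Int) → List (List (String × Int × Int))
  | [] => []
  | p :: run =>
    let e := (run.take s1).getLastD p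
    pvSegB s e d :: pvEmitRun s1 d e (run.drop s1)
termination_by l => l.length
decreasing_by simp [List.length_drop]

-- Source B's outer `while i < len(dirs)` loop
def pvWalk (s1 : Nat) (s : Int × Int) : List ((Int × Int) × (Int × Int)) → List (List (String × Int × Int))
  | [] => []
  | (d, p) :: rest =>
    let r := pvTakeRun d rest
    pvEmitRun s1 d s (p :: r.1) ++ pvWalk s1 (r.1.getLastD p) r.2
termination_by l => l.length
decreasing_by exact Nat.lt_succ_of_le (pvTakeRun_len _ _)

def segment_path_alt (path_points : List (Int × Int)) (max_segment_length : Int) : List (List (String × Int × Int)) :=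
  match path_points with
  | [] => []
  | [p] => [pvSegB p p (0, 0)]  -- Source B returns direction None here; unrepresentable, outside Pre_
  | p :: q :: ps =>
    let pairs := List.zipWith (fun a b => ((b.1 - a.1, b.2 - a.2), b)) (p :: q :: ps) (q :: ps)
    pvWalk ((max 1 max_segment_length).toNat - 1) p pairs

-- ===== PRECONDITION & SPEC =====
-- Pre_ excludes exactly the single-point lists, on which both Pythons return the same dict with
-- 'direction': None — a value outside the declared List (String × Int × Int) type.
def Pre_segment_path (path_points : List (Int × Int)) (max_segment_length : Int) : Prop :=
  path_points.length ≠ 1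

instance (path_points : List (Int × Int)) (max_segment_length : Int) : Decidable (Pre_segment_path path_points max_segment_length) := by unfold Pre_segment_path; infer_instance

def pvWitness_segment_path : (List (Int × Int)) × Int := ([(0, 0), (1, 0), (2, 0), (2, 1)], 2)

def Spec_segment_path (path_points : List (Int × Int)) (max_segment_length : Int) (out : List (List (String × Int × Int))) : Prop := out = segment_path_alt path_points max_segment_length
instance (path_points : List (Int × Int)) (max_segment_length : Int) (out : List (List (String × Int × Int))) : Decidable (Spec_segment_path path_points max_segment_length out) := by unfold Spec_segment_path; infer_instance

-- ===== CLAIM (what is proved, stated in full; the proofs are below) =====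
def Claim_equal_segment_path : Prop := ∀ (path_points : List (Int × Int)) (max_segment_length : Int), Dom_segment_path path_points max_segment_length → Pre_segment_path path_points max_segment_length → Spec_segment_path path_points max_segment_length (segment_path path_points max_segment_length)

-- ===== LEMMAS AND PROOFS =====

-- A's loop after the first delta, with the accumulator stripped off
def pvContB (m : Int) (s prev cd : Int × Int) (c : Int) :
    List (Int × Int) → List (List (String × Int × Int))
  | [] => [pvSegB s prev cd]
  | p :: ps =>
    let d : Int × Int := (p.1 - prev.1, p.2 - prev.2)
    if d ≠ cd ∨ c ≥ m then pvSegB s prev cd :: pvContB m prev p d 1 ps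
    else pvContB m s p cd (c + 1) ps

-- pvEmitRun resumed mid-chunk: cap endpoints of capacity left in the current chunk
def pvEmitRunP (s1 : Nat) (d : Int × Int) (s prev : Int × Int) (cap : Nat) :
    List (Int × Int) → List (List (String × Int × Int))
  | [] => [pvSegB s prev d]
  | e :: run =>
    match cap with
    | 0 => pvSegB s prev d :: pvEmitRunP s1 d prev e s1 run
    | cap' + 1 => pvEmitRunP s1 d s e cap' run

def pvPairs (prev : Int × Int) (ps : List (Int × Int)) : List ((Int × Int) × (Int × Int)) :=
  List.zipWith (fun a b => ((b.1 - a.1, b.2 - a.2), b)) (prev :: ps) ps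

theorem pvPairs_cons (prev p : Int × Int) (ps : List (Int × Int)) :
    pvPairs prev (p :: ps) = ((p.1 - prev.1, p.2 - prev.2), p) :: pvPairs p ps := by
  simp [pvPairs]

theorem pvLoopA_eq_contB (m : Int) (ps : List (Int × Int)) :
    ∀ segs s prev cd c,
      pvLoopA m segs s prev (some cd) c ps = segs ++ pvContB m s prev cd c ps := by
  induction ps with
  | nil => intro segs s prev cd c; simp [pvLoopA, pvContB, pvSegA, pvSegB]
  | cons p ps ih =>
    intro segs s prev cd c
    simp only [pvLoopA, pvContB]
    split_ifs with h
    · rw [ih]; simp [pvSegA, pvSegB]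
    · rw [ih]

theorem pvEmitRun_nil (s1 : Nat) (d s : Int × Int) : pvEmitRun s1 d s [] = [] := by
  rw [pvEmitRun.eq_def]

theorem pvEmitRun_cons (s1 : Nat) (d s p : Int × Int) (run : List (Int × Int)) :
    pvEmitRun s1 d s (p :: run) =
      pvSegB s ((run.take s1).getLastD p) d ::
        pvEmitRun s1 d ((run.take s1).getLastD p) (run.drop s1) := by
  rw [pvEmitRun.eq_def]

theorem pvWalk_nil (s1 : Nat) (s : Int × Int) : pvWalk s1 s [] = [] := by
  rw [pvWalk.eq_def]

theorem pvWalk_cons (s1 : Nat) (s : Int × Int) (d p : Int × Int) (rest : List ((Int × Int) × (Int × Int))) :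
    pvWalk s1 s ((d, p) :: rest) =
      pvEmitRun s1 d s (p :: (pvTakeRun d rest).1) ++
        pvWalk s1 ((pvTakeRun d rest).1.getLastD p) (pvTakeRun d rest).2 := by
  rw [pvWalk.eq_def]

theorem pvTakeRun_cons_eq (d p : Int × Int) (rest : List ((Int × Int) × (Int × Int))) :
    pvTakeRun d ((d, p) :: rest) = (p :: (pvTakeRun d rest).1, (pvTakeRun d rest).2) := by
  simp [pvTakeRun]

theorem pvTakeRun_cons_ne (d d' p : Int × Int) (rest : List ((Int × Int) × (Int × Int)))
    (h : d' ≠ d) : pvTakeRun d ((d', p) :: rest) = ([], (d', p) :: rest) := by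
  simp [pvTakeRun, h]

theorem pvEmitRunP_eq (s1 : Nat) (d : Int × Int) (run : List (Int × Int)) :
    ∀ s p cap, cap ≤ s1 →
      pvEmitRunP s1 d s p cap run =
        pvSegB s ((run.take cap).getLastD p) d ::
          pvEmitRun s1 d ((run.take cap).getLastD p) (run.drop cap) := by
  induction run with
  | nil => intro s p cap _; simp [pvEmitRunP, pvEmitRun_nil]
  | cons e run ih =>
    intro s p cap hcap
    match cap with
    | 0 =>
      simp only [pvEmitRunP, List.take_zero, List.getLastD, List.drop_zero]
      rw [pvEmitRun_cons, ih p e s1 le_rfl]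
    | cap' + 1 =>
      simp only [pvEmitRunP, List.take_succ_cons, List.getLastD_cons, List.drop_succ_cons]
      exact ih s e cap' (Nat.le_of_succ_le hcap)

-- the full-chunk instance: pvEmitRun on a fresh run
theorem pvEmitRun_eq (s1 : Nat) (d : Int × Int) (run : List (Int × Int)) (s p : Int × Int) :
    pvEmitRun s1 d s (p :: run) = pvEmitRunP s1 d s p s1 run := by
  rw [pvEmitRunP_eq s1 d run s p s1 le_rfl, pvEmitRun_cons]

theorem pvContB_eq_walk (m : Int) (s1 : Nat) (hm : (s1 : Int) + 1 = max 1 m)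
    (ps : List (Int × Int)) :
    ∀ s prev cd c, 1 ≤ c → c ≤ (s1 : Int) + 1 →
      pvContB m s prev cd c ps =
        pvEmitRunP s1 cd s prev (((s1 : Int) + 1 - c).toNat) (pvTakeRun cd (pvPairs prev ps)).1 ++
          pvWalk s1 ((pvTakeRun cd (pvPairs prev ps)).1.getLastD prev)
            (pvTakeRun cd (pvPairs prev ps)).2 := by
  induction ps with
  | nil =>
    intro s prev cd c _ _
    simp [pvContB, pvPairs, pvTakeRun, pvEmitRunP, pvWalk_nil]
  | cons p ps ih =>
    intro s prev cd c hc1 hc2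
    rw [pvPairs_cons]
    by_cases hd : ((p.1 - prev.1, p.2 - prev.2) : Int × Int) = cd
    · by_cases hcm : c ≥ m
      · -- same direction, chunk full: c = s1 + 1
        have hcap : ((s1 : Int) + 1 - c).toNat = 0 := by omega
        simp only [pvContB]
        rw [if_pos (Or.inr hcm), hd, pvTakeRun_cons_eq, hcap]
        simp only [pvEmitRunP]
        rw [ih prev p cd 1 le_rfl (by omega)]
        have h1 : ((s1 : Int) + 1 - 1).toNat = s1 := by omega
        rw [h1, List.getLastD_cons]
        simp
      · -- same direction, room in the chunk
        have hm1 : (1 : Int) ≤ m := by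
          by_contra h; exact hcm (by omega)
        have hlt : c < (s1 : Int) + 1 := by omega
        have hcap : ((s1 : Int) + 1 - c).toNat = (((s1 : Int) + 1 - (c + 1)).toNat) + 1 := by omega
        have hcond : ¬(((p.1 - prev.1, p.2 - prev.2) : Int × Int) ≠ cd ∨ c ≥ m) := by
          simp [hd]; omega
        simp only [pvContB]
        rw [if_neg hcond, hd, pvTakeRun_cons_eq, hcap]
        rw [ih s p cd (c + 1) (by omega) (by omega)]
        simp only [pvEmitRunP]
        rw [List.getLastD_cons]
    · -- direction change: close the segment, start a fresh run
      simp only [pvContB]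
      rw [if_pos (Or.inl hd), pvTakeRun_cons_ne _ _ _ _ hd]
      simp only [pvEmitRunP, List.getLastD]
      rw [ih prev p ((p.1 - prev.1, p.2 - prev.2)) 1 le_rfl (by omega)]
      have h1 : ((s1 : Int) + 1 - 1).toNat = s1 := by omega
      rw [h1, pvWalk_cons, pvEmitRun_eq]
      simp

-- ===== VERDICT (by name: the statement is the Claim_ definition above) =====
theorem segment_path_spec : Claim_equal_segment_path := by
  intro path_points m _ hpre
  unfold Spec_segment_path
  match path_points with
  | [] => rfl
  | [p] => exact absurd rfl hpre
  | p :: q :: ps =>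
    have hstep : (((max 1 m).toNat - 1 : Nat) : Int) + 1 = max 1 m := by omega
    set s1 : Nat := (max 1 m).toNat - 1 with hs1
    show pvLoopA m [] p p none 1 (q :: ps) = _
    simp only [pvLoopA]
    rw [pvLoopA_eq_contB, List.nil_append]
    rw [pvContB_eq_walk m s1 hstep ps p q _ 1 le_rfl (by omega)]
    have hc1 : ((s1 : Int) + 1 - 1).toNat = s1 := by omega
    rw [hc1]
    show _ = pvWalk s1 p (List.zipWith _ (p :: q :: ps) (q :: ps))
    have : List.zipWith (fun a b => ((b.1 - a.1, b.2 - a.2), b) : Int × Int → Int × Int → (Int × Int) × (Int × Int)) (p :: q :: ps) (q :: ps)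
        = ((q.1 - p.1, q.2 - p.2), q) :: pvPairs q ps := by simp [pvPairs]
    rw [this, pvWalk_cons, pvEmitRun_eq]
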